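-- pv_equiv track=rewrite | github.com/ltlly/binary-ninja-headless-mcp | binary_ninja_headless_mcp/fuzzer.py | _ordered_tool_names
-- ===== SOURCE A (Python) =====
-- from typing import Any
--
-- DEFERRED_TOOLS = {
--     "loader.rebase",
--     "project.close",
--     "session.close",
-- }
--
-- def _ordered_tool_names(tools_by_name: dict[str, dict[str, Any]]) -> list[str]:
--     seed_priority = [
--         "health.ping",
--         "binja.info",
--         "session.open",
--         "analysis.update",
--         "analysis.progress",
--         "binary.summary",
--         "binary.functions",
--         "binary.strings",
--         "binary.sections",
--         "binary.segments",
--         "binary.symbols",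
--         "binary.data_vars",
--         "arch.info",
--         "function.variables",
--         "workflow.describe",
--         "loader.load_settings_types",
--         "plugin.valid_commands",
--         "plugin_repo.status",
--         "type.parse_string",
--         "type.define_user",
--         "type_library.create",
--         "type_archive.create",
--         "project.create",
--         "task.search_text",
--         "task.analysis_update",
--     ]
--
--     names = [
--         name for name in seed_priority if name in tools_by_name and name not in DEFERRED_TOOLS
--     ]
--     remaining = sorted(
--         name for name in tools_by_name if name not in names and name not in DEFERRED_TOOLS
--     )
--     return names + remaining
-- ===== SOURCE B (Python) =====
-- from typing import Any
--
-- DEFERRED_TOOLS = {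
--     "loader.rebase",
--     "project.close",
--     "session.close",
-- }
--
-- def _ordered_tool_names(tools_by_name: dict[str, dict[str, Any]]) -> list[str]:
--     seed_priority = [
--         "health.ping",
--         "binja.info",
--         "session.open",
--         "analysis.update",
--         "analysis.progress",
--         "binary.summary",
--         "binary.functions",
--         "binary.strings",
--         "binary.sections",
--         "binary.segments",
--         "binary.symbols",
--         "binary.data_vars",
--         "arch.info",
--         "function.variables",
--         "workflow.describe",
--         "loader.load_settings_types",
--         "plugin.valid_commands",
--         "plugin_repo.status",
--         "type.parse_string",
--         "type.define_user",
--         "type_library.create",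
--         "type_archive.create",
--         "project.create",
--         "task.search_text",
--         "task.analysis_update",
--     ]
--     index_map = {name: i for i, name in enumerate(seed_priority)}
--     sentinel = len(seed_priority)
--     return sorted(
--         (n for n in tools_by_name if n not in DEFERRED_TOOLS),
--         key=lambda n: (index_map.get(n, sentinel), n),
--     )
-- ===== Notes on version B (the rewrite author's own statement) =====
-- stated objective: idiomatic
-- what changed: Replaces the two-phase filter-seed-list-then-sort-remainder construction by one keyed sort over the non-deferred tool names, using an index map of the seed priorities and a sentinel rank, with the name as tie-breaker.
import Mathlib
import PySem

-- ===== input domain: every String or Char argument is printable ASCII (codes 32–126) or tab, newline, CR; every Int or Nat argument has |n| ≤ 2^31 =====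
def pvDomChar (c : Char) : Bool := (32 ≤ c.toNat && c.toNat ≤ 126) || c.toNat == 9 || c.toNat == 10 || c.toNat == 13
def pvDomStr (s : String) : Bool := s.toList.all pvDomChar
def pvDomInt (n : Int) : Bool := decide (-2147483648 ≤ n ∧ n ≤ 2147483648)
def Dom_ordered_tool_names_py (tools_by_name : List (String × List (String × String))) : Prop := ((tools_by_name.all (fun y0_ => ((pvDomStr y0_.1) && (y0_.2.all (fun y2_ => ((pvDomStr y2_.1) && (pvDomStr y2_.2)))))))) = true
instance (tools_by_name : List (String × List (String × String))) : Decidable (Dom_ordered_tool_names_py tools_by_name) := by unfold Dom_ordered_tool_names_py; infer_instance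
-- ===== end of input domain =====

-- B replaces A's two-phase filter-then-sort construction by one keyed sort (seed-index rank with sentinel, name tie-breaker); idiomatic, same cost.


-- ===== PORT A =====
-- module constant DEFERRED_TOOLS (a Python set literal)
def pvDeferred : PySem.Set String :=
  PySem.Set.ofList ["loader.rebase", "project.close", "session.close"]

-- the seed_priority list (identical in A and B's source)
def pvSeedPriority : List String :=
  ["health.ping", "binja.info", "session.open", "analysis.update", "analysis.progress",
   "binary.summary", "binary.functions", "binary.strings", "binary.sections",
   "binary.segments", "binary.symbols", "binary.data_vars", "arch.info",
   "function.variables", "workflow.describe", "loader.load_settings_types",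
   "plugin.valid_commands", "plugin_repo.status", "type.parse_string",
   "type.define_user", "type_library.create", "type_archive.create",
   "project.create", "task.search_text", "task.analysis_update"]

-- 'for name in tools_by_name' iterates the dict's (unique) keys in insertion order
def ordered_tool_names_py (tools_by_name : List (String × List (String × String))) : List String :=
  let keys := PySem.List.dedup (tools_by_name.map Prod.fst)
  let names := pvSeedPriority.filter
    (fun n => keys.contains n && !(PySem.Set.contains pvDeferred n))
  let remaining := PySem.List.sorted
    (keys.filter (fun n => !(names.contains n) && !(PySem.Set.contains pvDeferred n)))
    (fun x => x)
  names ++ remaining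

-- ===== PORT B =====
-- index_map = {name: i for i, name in enumerate(seed_priority)}
def pvIndexMap : PySem.Dict String Int :=
  (PySem.List.enumerate pvSeedPriority 0).foldl
    (fun d p => d.insert p.2 (p.1 : Int)) PySem.Dict.empty

def ordered_tool_names_py_alt (tools_by_name : List (String × List (String × String))) : List String :=
  let sentinel : Int := (pvSeedPriority.length : Int)
  PySem.List.sorted2
    ((PySem.List.dedup (tools_by_name.map Prod.fst)).filter
      (fun n => !(PySem.Set.contains pvDeferred n)))
    (fun n => pvIndexMap.getD n sentinel) (fun n => n)

-- ===== PRECONDITION & SPEC =====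
def Spec_ordered_tool_names_py (tools_by_name : List (String × List (String × String))) (out : List String) : Prop := out = ordered_tool_names_py_alt tools_by_name
instance (tools_by_name : List (String × List (String × String))) (out : List String) : Decidable (Spec_ordered_tool_names_py tools_by_name out) := by unfold Spec_ordered_tool_names_py; infer_instance

-- ===== CLAIM (what is proved, stated in full; the proofs are below) =====
def Claim_equal_ordered_tool_names_py : Prop := ∀ (tools_by_name : List (String × List (String × String))), Dom_ordered_tool_names_py tools_by_name → Spec_ordered_tool_names_py tools_by_name (ordered_tool_names_py tools_by_name)

-- ===== LEMMAS AND PROOFS =====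

-- abbreviation used only by the proofs: B's rank of a name
def pvRank (n : String) : Int := pvIndexMap.getD n (pvSeedPriority.length : Int)

-- sorted2 with linear-order keys IS sorted with the lexicographic key
theorem pv_sorted2_eq_sorted_lex (xs : List String) (k1 : String → Int) (k2 : String → String) :
    PySem.List.sorted2 xs k1 k2 = PySem.List.sorted xs (fun x => toLex (k1 x, k2 x)) := by
  unfold PySem.List.sorted2 PySem.List.sorted
  simp only []
  congr 1
  funext acc x
  congr 1
  funext a b
  by_cases h1 : k1 a < k1 b
  · simp [h1, Prod.Lex.toLex_lt_toLex]
  · by_cases h2 : k1 b < k1 a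
    · simp [h1, h2, Prod.Lex.toLex_lt_toLex]
      intro h; omega
    · have he : k1 a = k1 b := le_antisymm (not_lt.mp h2) (not_lt.mp h1)
      simp [he, Prod.Lex.toLex_lt_toLex]

theorem pv_keys_indexMap : pvIndexMap.keys = pvSeedPriority := by decide

theorem pv_rank_notmem (n : String) (h : n ∉ pvSeedPriority) : pvRank n = (pvSeedPriority.length : Int) := by
  have : pvIndexMap.get? n = none := by
    rw [PySem.Dict.get?_eq_none_iff_not_mem_keys, pv_keys_indexMap]
    exact h
  simp [pvRank, PySem.Dict.getD, this]

theorem pv_seed_nodup : pvSeedPriority.Nodup := by decide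

theorem pv_seed_rank_lt : List.Pairwise (fun a b => pvRank a < pvRank b) pvSeedPriority := by decide

theorem pv_seed_rank_bound : ∀ n ∈ pvSeedPriority, pvRank n < (pvSeedPriority.length : Int) := by decide

theorem ordered_tool_names_py_spec : Claim_equal_ordered_tool_names_py := by
  intro tbn _
  unfold Spec_ordered_tool_names_py ordered_tool_names_py ordered_tool_names_py_alt
  simp only []
  set ks := PySem.List.dedup (tbn.map Prod.fst) with hks_def
  have hks : ks.Nodup := PySem.List.nodup_dedup _
  set defB : String → Bool := fun n => !(PySem.Set.contains pvDeferred n) with hdefB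
  set p : String → Bool := fun n => ks.contains n && defB n with hp
  set names := pvSeedPriority.filter p with hnames
  set q : String → Bool := fun n => !(names.contains n) && defB n with hq
  set rem := ks.filter q with hrem
  set blist := ks.filter defB with hblist
  -- facts about membership
  have hnames_mem : ∀ a, a ∈ names ↔ a ∈ pvSeedPriority ∧ a ∈ ks ∧ defB a = true := by
    intro a
    simp [hnames, hp, List.mem_filter]
  have hnames_nodup : names.Nodup := pv_seed_nodup.filter _
  have hrem_mem : ∀ a, a ∈ rem ↔ a ∈ ks ∧ a ∉ names ∧ defB a = true := by
    intro a
    simp [hrem, hq, List.mem_filter]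
  have hrem_notseed : ∀ a ∈ rem, a ∉ pvSeedPriority := by
    intro a ha hseed
    rcases (hrem_mem a).mp ha with ⟨hk, hnm, hd⟩
    exact hnm ((hnames_mem a).mpr ⟨hseed, hk, hd⟩)
  have hrem_rank : ∀ a ∈ rem, pvRank a = (pvSeedPriority.length : Int) := fun a ha =>
    pv_rank_notmem a (hrem_notseed a ha)
  -- STEP 1: rewrite B as a sort by the lexicographic key
  rw [pv_sorted2_eq_sorted_lex]
  -- STEP 2: B's sorted output is exactly names ++ sorted rem
  refine (PySem.List.sorted_eq_of_perm_of_pairwise_lt blist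
    (names ++ PySem.List.sorted rem (fun x => x))
    (fun n => toLex (pvRank n, n)) ?_ ?_).symm
  · -- permutation
    have h1 : (names ++ PySem.List.sorted rem (fun x => x)).Perm (names ++ rem) :=
      List.Perm.append_left names (PySem.List.sorted_perm rem (fun x => x) false)
    have hsplit : (blist.filter (fun n => names.contains n) ++
        blist.filter (fun n => !(names.contains n))).Perm blist :=
      List.filter_append_perm _ _
    have h3 : blist.filter (fun n => !(names.contains n)) = rem := by
      rw [hblist, List.filter_filter, hrem, hq]
    have h4 : (blist.filter (fun n => names.contains n)).Perm names := by
      rw [List.perm_ext_iff_of_nodup (List.Nodup.filter _ (List.Nodup.filter _ hks)) hnames_nodup]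
      · intro a
        constructor
        · intro ha
          rw [List.mem_filter] at ha
          exact List.contains_iff_mem.mp ha.2
        · intro ha
          rcases (hnames_mem a).mp ha with ⟨_, hk, hd⟩
          refine List.mem_filter.mpr ⟨List.mem_filter.mpr ⟨hk, hd⟩, List.contains_iff_mem.mpr ha⟩
    refine h1.trans ?_
    rw [← h3]
    exact (h4.symm.append_right _).trans hsplit
  · -- strict lexicographic increase
    rw [List.pairwise_append]
    refine ⟨?_, ?_, ?_⟩
    · -- names: ranks strictly increase along seed_priority
      have := pv_seed_rank_lt.sublist (List.filter_sublist (l := pvSeedPriority) (p := p))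
      exact this.imp (fun h => Prod.Lex.toLex_lt_toLex.mpr (Or.inl h))
    · -- sorted remainder: equal ranks, strictly increasing names
      have hle : List.Pairwise (fun a b => a ≤ b) (PySem.List.sorted rem (fun x => x)) :=
        PySem.List.sorted_pairwise rem (fun x => x)
      have hrem_nodup : rem.Nodup := hks.filter _
      have hnd : (PySem.List.sorted rem (fun x => x)).Nodup :=
        ((PySem.List.sorted_perm rem (fun x => x) false).nodup_iff).mpr hrem_nodup
      have hlt : List.Pairwise (fun a b : String => a < b) (PySem.List.sorted rem (fun x => x)) :=
        (hle.and hnd).imp (fun ⟨h1, h2⟩ => lt_of_le_of_ne h1 h2)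
      refine hlt.imp_of_mem ?_
      intro a b ha hb h
      have hra := hrem_rank a ((PySem.List.mem_sorted rem (fun x => x) false a).mp ha)
      have hrb := hrem_rank b ((PySem.List.mem_sorted rem (fun x => x) false b).mp hb)
      exact Prod.Lex.toLex_lt_toLex.mpr (Or.inr ⟨by rw [hra, hrb], h⟩)
    · -- cross: every seed name ranks below the sentinel
      intro a ha b hb
      have haseed : a ∈ pvSeedPriority := ((hnames_mem a).mp ha).1
      have h1 : pvRank a < (pvSeedPriority.length : Int) := pv_seed_rank_bound a haseed
      have h2 : pvRank b = (pvSeedPriority.length : Int) :=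
        hrem_rank b ((PySem.List.mem_sorted rem (fun x => x) false b).mp hb)
      exact Prod.Lex.toLex_lt_toLex.mpr (Or.inl (by rw [h2]; exact h1))
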